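-- pv_equiv track=rewrite | github.com/junyuanM/ReSmart | alg.py | update_feasible_set
-- ===== SOURCE A (Python) =====
-- def update_feasible_set(time_slot, num_players, num_arms, arm_to_player_preferences, matching_result, feasible_set):
--     feasible_set = [[] for _ in range(num_players)]
--     current_max_arm_pre = [-1] * num_arms
--     for i in range(num_players):
--         mi = matching_result[time_slot -1][i]
--         if mi == -1:
--             continue
--         current_max_arm_pre[mi] = i
--     for j in range(num_arms):
--         if current_max_arm_pre[j] != -1:
--             k = 0
--             while arm_to_player_preferences[j][k] != current_max_arm_pre[j]:
--                 feasible_set[arm_to_player_preferences[j][k]].append(j)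
--                 k += 1
--             feasible_set[arm_to_player_preferences[j][k]].append(j)
--         else:
--             for l in range(num_players):
--                 feasible_set[l].append(j)
--     return feasible_set
-- ===== SOURCE B (Python) =====
-- def update_feasible_set(time_slot, num_players, num_arms, arm_to_player_preferences, matching_result, feasible_set):
--     arm_matched = [-1] * num_arms
--     for i in range(num_players):
--         mi = matching_result[time_slot - 1][i]
--         if mi != -1:
--             arm_matched[mi] = i
--     feasible_players = []
--     for j in range(num_arms):
--         if arm_matched[j] == -1:
--             feasible_players.append(None)  # every player is feasible for an unmatched arm
--         else:
--             prefs = arm_to_player_preferences[j]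
--             k = 0
--             while prefs[k] != arm_matched[j]:
--                 k += 1
--             feasible_players.append(set(prefs[:k + 1]))
--     return [[j for j in range(num_arms)
--              if feasible_players[j] is None or p in feasible_players[j]]
--             for p in range(num_players)]
-- ===== Notes on version B (the rewrite author's own statement) =====
-- stated objective: alternative
-- what changed: Instead of mutating per-player lists by appending arms while walking each arm's preference prefix, B precomputes each arm's feasible-player set once (None for unmatched arms) and then builds each player's row directly as a comprehension filtering arms by set membership.
-- outside the precondition, e.g. on update_feasible_set(1, 2, 1, [[0, 0, 1]], [[-1, 0]], []): A returns [[0, 0], [0]], B returns [[0], [0]]; on update_feasible_set(1, 2, 1, [[-1, 0]], [[0, -1]], []): A returns [[0], [0]], B returns [[0], []]; on update_feasible_set(1, 1, 2, [[0], [0]], [[-2]], []): A returns [[0, 1]], B returns [[0, 1]]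
import Mathlib
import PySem

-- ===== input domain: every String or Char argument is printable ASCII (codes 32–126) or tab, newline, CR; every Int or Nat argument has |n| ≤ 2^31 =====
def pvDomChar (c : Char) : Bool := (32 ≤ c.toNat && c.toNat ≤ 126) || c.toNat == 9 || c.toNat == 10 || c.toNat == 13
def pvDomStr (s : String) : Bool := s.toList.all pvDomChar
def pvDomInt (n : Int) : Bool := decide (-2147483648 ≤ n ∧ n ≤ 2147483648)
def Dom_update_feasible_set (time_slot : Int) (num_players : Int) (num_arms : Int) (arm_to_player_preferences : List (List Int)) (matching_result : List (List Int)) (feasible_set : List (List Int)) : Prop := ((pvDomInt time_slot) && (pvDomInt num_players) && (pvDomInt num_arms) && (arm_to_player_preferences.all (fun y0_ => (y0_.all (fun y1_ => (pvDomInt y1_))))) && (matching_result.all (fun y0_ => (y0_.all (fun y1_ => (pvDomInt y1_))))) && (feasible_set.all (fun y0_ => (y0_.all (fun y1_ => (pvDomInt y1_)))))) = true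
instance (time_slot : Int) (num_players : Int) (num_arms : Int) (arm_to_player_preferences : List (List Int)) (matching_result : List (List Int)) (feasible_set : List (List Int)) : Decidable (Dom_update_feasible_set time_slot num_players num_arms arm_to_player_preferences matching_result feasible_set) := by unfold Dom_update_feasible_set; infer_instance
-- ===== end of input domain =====

-- ===== PORT A =====
-- B restructures A: one feasible-player set per arm, then each player's row built by
-- filtering arms on set membership ("alternative" objective; same value on Pre_).

-- feasible_set[p].append(j): Python list indexing (negative index wraps, out of range is
-- IndexError; in the raising case — excluded by Pre_ — the port leaves the state unchanged).
def pvAppendAt (fs : List (List Int)) (p : Int) (j : Int) : List (List Int) :=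
  match PySem.List.pyIdx? fs.length p with
  | some n => fs.set n ((fs.getD n []) ++ [j])
  | none => fs

-- A's while-walk over arm j's preference list: append j until (and including) the matched
-- player; an exhausted list is Python's IndexError (excluded by Pre_; the port stops there).
def pvWalkA (pj : List Int) (m : Int) (j : Int) (fs : List (List Int)) : List (List Int) :=
  match pj with
  | [] => fs
  | p :: rest => if p ≠ m then pvWalkA rest m j (pvAppendAt fs p j) else pvAppendAt fs p j

def update_feasible_set (time_slot : Int) (num_players : Int) (num_arms : Int) (arm_to_player_preferences : List (List Int)) (matching_result : List (List Int)) (feasible_set : List (List Int)) : List (List Int) :=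
  let fs0 : List (List Int) := List.replicate num_players.toNat []
  let cur : List Int := (PySem.List.pyRange 0 num_players 1).foldl
    (fun cur i =>
      let mi := PySem.List.pyGetD (PySem.List.pyGetD matching_result (time_slot - 1) []) i 0
      if mi = -1 then cur else PySem.List.pySetD cur mi i)
    (List.replicate num_arms.toNat (-1))
  (PySem.List.pyRange 0 num_arms 1).foldl
    (fun fs j =>
      if PySem.List.pyGetD cur j 0 ≠ -1 then
        pvWalkA (PySem.List.pyGetD arm_to_player_preferences j []) (PySem.List.pyGetD cur j 0) j fs
      else
        (PySem.List.pyRange 0 num_players 1).foldl (fun fs l => pvAppendAt fs l j) fs)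
    fs0

-- ===== PORT B =====
-- B's while-walk: prefs[:k+1] where k is the first index with prefs[k] == matched
-- (the whole list if the matched player is absent — Python raises there, outside Pre_).
def pvPrefixUpto (pj : List Int) (m : Int) : List Int :=
  match pj with
  | [] => []
  | p :: rest => if p ≠ m then p :: pvPrefixUpto rest m else [p]

def update_feasible_set_alt (time_slot : Int) (num_players : Int) (num_arms : Int) (arm_to_player_preferences : List (List Int)) (matching_result : List (List Int)) (feasible_set : List (List Int)) : List (List Int) :=
  let armMatched : List Int := (PySem.List.pyRange 0 num_players 1).foldl
    (fun cur i =>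
      let mi := PySem.List.pyGetD (PySem.List.pyGetD matching_result (time_slot - 1) []) i 0
      if mi = -1 then cur else PySem.List.pySetD cur mi i)
    (List.replicate num_arms.toNat (-1))
  let feas : List (Option (PySem.Set Int)) := (PySem.List.pyRange 0 num_arms 1).map
    (fun j =>
      let m := PySem.List.pyGetD armMatched j 0
      if m = -1 then none
      else some (PySem.Set.ofList (pvPrefixUpto (PySem.List.pyGetD arm_to_player_preferences j []) m)))
  (PySem.List.pyRange 0 num_players 1).map
    (fun p => (PySem.List.pyRange 0 num_arms 1).filter
      (fun j =>
        match PySem.List.pyGetD feas j none with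
        | none => true
        | some s => s.contains p))

-- ===== PRECONDITION & SPEC =====
-- Pre_ is the function's natural domain: either no players at all (A touches nothing and
-- returns []), or a valid time slot whose matching row covers every player with entries -1
-- or a valid arm id, every finally-matched player occurring in its arm's preference list,
-- and preference lists that are duplicate-free lists of valid player ids.  Outside it A
-- raises IndexError, silently appends an arm twice on a duplicated preference entry, or
-- wraps a negative matching/preference entry as a Python negative index (see the excluded
-- examples cited in the claim).
-- matching_result[time_slot - 1], the only row A reads
def pvRow (matching_result : List (List Int)) (time_slot : Int) : List Int :=
  matching_result.getD (time_slot - 1).toNat []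

def Pre_update_feasible_set (time_slot : Int) (num_players : Int) (num_arms : Int) (arm_to_player_preferences : List (List Int)) (matching_result : List (List Int)) (feasible_set : List (List Int)) : Prop :=
  num_players ≤ 0 ∨
  (0 ≤ num_players ∧
  1 ≤ time_slot ∧ time_slot ≤ (matching_result.length : Int) ∧
  num_players ≤ ((pvRow matching_result time_slot).length : Int) ∧
  (∀ i ∈ List.range num_players.toNat,
    (pvRow matching_result time_slot).getD i 0 = -1 ∨
    (0 ≤ (pvRow matching_result time_slot).getD i 0 ∧
     (pvRow matching_result time_slot).getD i 0 < num_arms)) ∧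
  (∀ i ∈ List.range num_players.toNat,
    (pvRow matching_result time_slot).getD i 0 ≠ -1 →
    (∀ i' ∈ List.range num_players.toNat, i < i' →
      (pvRow matching_result time_slot).getD i' 0 ≠ (pvRow matching_result time_slot).getD i 0) →
    (i : Int) ∈ arm_to_player_preferences.getD
      ((pvRow matching_result time_slot).getD i 0).toNat []) ∧
  (∀ j ∈ List.range num_arms.toNat,
    (arm_to_player_preferences.getD j []).Nodup ∧
    ∀ x ∈ arm_to_player_preferences.getD j [], 0 ≤ x ∧ x < num_players))
instance (time_slot : Int) (num_players : Int) (num_arms : Int) (arm_to_player_preferences : List (List Int)) (matching_result : List (List Int)) (feasible_set : List (List Int)) : Decidable (Pre_update_feasible_set time_slot num_players num_arms arm_to_player_preferences matching_result feasible_set) := by unfold Pre_update_feasible_set; infer_instance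

def pvWitness_update_feasible_set : Int × Int × Int × List (List Int) × List (List Int) × List (List Int) :=
  (1, 2, 2, [[0, 1], [1, 0]], [[0, 1]], [])

def Spec_update_feasible_set (time_slot : Int) (num_players : Int) (num_arms : Int) (arm_to_player_preferences : List (List Int)) (matching_result : List (List Int)) (feasible_set : List (List Int)) (out : List (List Int)) : Prop := out = update_feasible_set_alt time_slot num_players num_arms arm_to_player_preferences matching_result feasible_set
instance (time_slot : Int) (num_players : Int) (num_arms : Int) (arm_to_player_preferences : List (List Int)) (matching_result : List (List Int)) (feasible_set : List (List Int)) (out : List (List Int)) : Decidable (Spec_update_feasible_set time_slot num_players num_arms arm_to_player_preferences matching_result feasible_set out) := by unfold Spec_update_feasible_set; infer_instance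

-- ===== CLAIM (what is proved, stated in full; the proofs are below) =====
def Claim_equal_update_feasible_set : Prop := ∀ (time_slot : Int) (num_players : Int) (num_arms : Int) (arm_to_player_preferences : List (List Int)) (matching_result : List (List Int)) (feasible_set : List (List Int)), Dom_update_feasible_set time_slot num_players num_arms arm_to_player_preferences matching_result feasible_set → Pre_update_feasible_set time_slot num_players num_arms arm_to_player_preferences matching_result feasible_set → Spec_update_feasible_set time_slot num_players num_arms arm_to_player_preferences matching_result feasible_set (update_feasible_set time_slot num_players num_arms arm_to_player_preferences matching_result feasible_set)

-- ===== LEMMAS AND PROOFS =====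
lemma pvPyGetD_nonneg {a : Type} (xs : List a) (i : Int) (d : a) (h : 0 ≤ i) :
    PySem.List.pyGetD xs i d = xs.getD i.toNat d := by
  have hi : i = ((i.toNat : Nat) : Int) := (Int.toNat_of_nonneg h).symm
  conv_lhs => rw [hi]
  rw [PySem.List.pyGetD_natCast]

lemma pvPyIdx_of_range (n : Nat) (p : Int) (h0 : 0 ≤ p) (h1 : p < (n : Int)) :
    PySem.List.pyIdx? n p = some p.toNat := by
  unfold PySem.List.pyIdx?
  simp [h0, h1]

lemma pvLength_pvAppendAt (fs : List (List Int)) (p j : Int) :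
    (pvAppendAt fs p j).length = fs.length := by
  unfold pvAppendAt
  cases PySem.List.pyIdx? fs.length p <;> simp

-- folding appends over a duplicate-free list of in-range players touches each row at most once
lemma pvFoldAppend (j : Int) :
    ∀ (L : List Int) (fs : List (List Int)), L.Nodup →
    (∀ x ∈ L, 0 ≤ x ∧ x < (fs.length : Int)) →
    (L.foldl (fun fs x => pvAppendAt fs x j) fs).length = fs.length ∧
    ∀ q : Nat, q < fs.length →
      (L.foldl (fun fs x => pvAppendAt fs x j) fs).getD q [] =
        fs.getD q [] ++ (if (q : Int) ∈ L then [j] else []) := by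
  intro L
  induction L with
  | nil => intro fs _ _; simp
  | cons x rest ih =>
    intro fs hnd hr
    have hx := hr x List.mem_cons_self
    have hxlt : x.toNat < fs.length := by omega
    have hfs' : pvAppendAt fs x j = fs.set x.toNat ((fs.getD x.toNat []) ++ [j]) := by
      unfold pvAppendAt
      rw [pvPyIdx_of_range fs.length x hx.1 hx.2]
    have hlen' : (pvAppendAt fs x j).length = fs.length := pvLength_pvAppendAt fs x j
    obtain ⟨hndx, hndrest⟩ := List.nodup_cons.mp hnd
    have ih' := ih (pvAppendAt fs x j) hndrest (by
      intro y hy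
      have := hr y (List.mem_cons_of_mem _ hy)
      rw [hlen']; exact this)
    refine ⟨by simpa [hlen'] using ih'.1, ?_⟩
    intro q hq
    have hq' : q < (pvAppendAt fs x j).length := by rw [hlen']; exact hq
    have hmain := ih'.2 q hq'
    simp only [List.foldl_cons]
    rw [hmain, hfs']
    have hget : (fs.set x.toNat ((fs.getD x.toNat []) ++ [j])).getD q [] =
        if q = x.toNat then (fs.getD x.toNat []) ++ [j] else fs.getD q [] := by
      rw [List.getD_eq_getElem?_getD, List.getElem?_set]
      by_cases hqx : q = x.toNat
      · subst hqx
        simp [hxlt, List.getD_eq_getElem?_getD]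
      · have hne : x.toNat ≠ q := fun h => hqx h.symm
        simp [hne, hqx, List.getD_eq_getElem?_getD]
    rw [hget]
    by_cases hqx : q = x.toNat
    · have hqi : (q : Int) = x := by omega
      rw [if_pos hqx, hqi, hqx]
      simp [hndx]
    · have hqi : (q : Int) ≠ x := by omega
      rw [if_neg hqx]
      simp [List.mem_cons, hqi]

lemma pvWalkA_eq (m j : Int) :
    ∀ (pj : List Int) (fs : List (List Int)),
    pvWalkA pj m j fs = (pvPrefixUpto pj m).foldl (fun fs x => pvAppendAt fs x j) fs := by
  intro pj
  induction pj with
  | nil => intro fs; simp [pvWalkA, pvPrefixUpto]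
  | cons p rest ih =>
    intro fs
    by_cases h : p = m <;> simp [pvWalkA, pvPrefixUpto, h, ih]

lemma pvPrefixUpto_sublist (pj : List Int) (m : Int) : (pvPrefixUpto pj m).Sublist pj := by
  induction pj with
  | nil => simp [pvPrefixUpto]
  | cons p rest ih =>
    unfold pvPrefixUpto
    by_cases h : p = m
    · simp [h]
    · simpa [h] using ih.cons₂ p

lemma pvAppendAt_nil (p j : Int) : pvAppendAt [] p j = [] := by
  unfold pvAppendAt
  cases PySem.List.pyIdx? (List.length ([] : List (List Int))) p <;> rfl

lemma pvWalkA_nil (m j : Int) : ∀ (pj : List Int), pvWalkA pj m j [] = [] := by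
  intro pj
  induction pj with
  | nil => rfl
  | cons p rest ih => by_cases h : p = m <;> simp [pvWalkA, h, pvAppendAt_nil, ih]

-- the effect of A's per-arm pass on row q is exactly "append j iff B marks q feasible for j"
lemma pvOuter (cur : List Int) (prefs : List (List Int)) (np : Int) (hnp : 0 ≤ np) :
    ∀ (arms : List Int) (fs : List (List Int)),
    fs.length = np.toNat →
    (∀ j ∈ arms, 0 ≤ j ∧
       (pvPrefixUpto (prefs.getD j.toNat []) (PySem.List.pyGetD cur j 0)).Nodup ∧
       (∀ x ∈ pvPrefixUpto (prefs.getD j.toNat []) (PySem.List.pyGetD cur j 0), 0 ≤ x ∧ x < np)) →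
    (arms.foldl (fun fs j =>
        if PySem.List.pyGetD cur j 0 ≠ -1 then
          pvWalkA (PySem.List.pyGetD prefs j []) (PySem.List.pyGetD cur j 0) j fs
        else
          (PySem.List.pyRange 0 np 1).foldl (fun fs l => pvAppendAt fs l j) fs) fs).length = np.toNat ∧
    ∀ q : Nat, q < np.toNat →
      (arms.foldl (fun fs j =>
          if PySem.List.pyGetD cur j 0 ≠ -1 then
            pvWalkA (PySem.List.pyGetD prefs j []) (PySem.List.pyGetD cur j 0) j fs
          else
            (PySem.List.pyRange 0 np 1).foldl (fun fs l => pvAppendAt fs l j) fs) fs).getD q [] =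
        fs.getD q [] ++ arms.filter (fun j =>
          if PySem.List.pyGetD cur j 0 = -1 then true
          else (PySem.Set.ofList (pvPrefixUpto (prefs.getD j.toNat []) (PySem.List.pyGetD cur j 0))).contains (q : Int)) := by
  intro arms
  induction arms with
  | nil => intro fs hlen _; simpa using hlen
  | cons a rest ih =>
    intro fs hlen harms
    obtain ⟨ha0, hand, harange⟩ := harms a List.mem_cons_self
    have hpg : PySem.List.pyGetD prefs a [] = prefs.getD a.toNat [] :=
      pvPyGetD_nonneg prefs a [] ha0
    have hfslen : (fs.length : Int) = np := by rw [hlen]; omega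
    -- the effect of processing arm a alone
    have hstep : ((if PySem.List.pyGetD cur a 0 ≠ -1 then
            pvWalkA (PySem.List.pyGetD prefs a []) (PySem.List.pyGetD cur a 0) a fs
          else
            (PySem.List.pyRange 0 np 1).foldl (fun fs l => pvAppendAt fs l a) fs).length = np.toNat) ∧
        ∀ q : Nat, q < np.toNat →
          (if PySem.List.pyGetD cur a 0 ≠ -1 then
            pvWalkA (PySem.List.pyGetD prefs a []) (PySem.List.pyGetD cur a 0) a fs
          else
            (PySem.List.pyRange 0 np 1).foldl (fun fs l => pvAppendAt fs l a) fs).getD q [] =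
          fs.getD q [] ++ (if (if PySem.List.pyGetD cur a 0 = -1 then true
            else (PySem.Set.ofList (pvPrefixUpto (prefs.getD a.toNat []) (PySem.List.pyGetD cur a 0))).contains (q : Int)) = true
            then [a] else []) := by
      by_cases hm : PySem.List.pyGetD cur a 0 = -1
      · have hfa := pvFoldAppend a (PySem.List.pyRange 0 np 1) fs
          (PySem.List.nodup_pyRange_one 0 np)
          (by intro y hy
              have := PySem.List.mem_pyRange_one.mp hy
              constructor <;> omega)
        simp only [if_neg (not_not_intro hm), if_pos hm]
        refine ⟨by rw [hfa.1, hlen], ?_⟩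
        intro q hq
        have hq' : q < fs.length := by omega
        rw [hfa.2 q hq']
        have hmem : (q : Int) ∈ PySem.List.pyRange 0 np 1 := by
          rw [PySem.List.mem_pyRange_one]; omega
        simp [hmem]
      · have hfa := pvFoldAppend a (pvPrefixUpto (prefs.getD a.toNat []) (PySem.List.pyGetD cur a 0)) fs
          hand
          (by intro y hy
              have := harange y hy
              constructor
              · exact this.1
              · omega)
        simp only [if_pos hm, if_neg hm, pvWalkA_eq, hpg]
        refine ⟨by rw [hfa.1, hlen], ?_⟩
        intro q hq
        have hq' : q < fs.length := by omega
        rw [hfa.2 q hq']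
        simp
    have ih' := ih _ hstep.1 (by intro y hy; exact harms y (List.mem_cons_of_mem _ hy))
    refine ⟨by simpa using ih'.1, ?_⟩
    intro q hq
    simp only [List.foldl_cons]
    rw [ih'.2 q hq, hstep.2 q hq, List.filter_cons, List.append_assoc]
    by_cases hpred : (if PySem.List.pyGetD cur a 0 = -1 then true
        else (PySem.Set.ofList (pvPrefixUpto (prefs.getD a.toNat []) (PySem.List.pyGetD cur a 0))).contains (q : Int)) = true
    · simp only [hpred]
      simp
    · simp only [Bool.not_eq_true] at hpred
      simp only [hpred]
      simp

-- ===== VERDICT (by name: the statement is the Claim_ definition above) =====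
theorem update_feasible_set_spec : Claim_equal_update_feasible_set := by
  unfold Claim_equal_update_feasible_set
  intro time_slot num_players num_arms prefs mres fs0arg _hdom hpre
  unfold Spec_update_feasible_set
  rcases hpre with hnp0 | ⟨h0p, hts1, hts2, hrowlen, _hvals, _hmem, hprefs⟩
  · -- no players: A's rows list is empty and every append is a no-op, B maps over nothing
    have h0 : num_players.toNat = 0 := by omega
    have hr : PySem.List.pyRange 0 num_players 1 = [] :=
      PySem.List.pyRange_one_eq_nil (by omega)
    simp only [update_feasible_set, update_feasible_set_alt, h0, hr,
      List.replicate, List.map_nil, List.foldl_nil]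
    refine List.foldl_fixed' ?_ _
    intro a
    by_cases hm : PySem.List.pyGetD (List.replicate num_arms.toNat (-1)) a 0 ≠ -1
    · simp only [if_pos hm]
      exact pvWalkA_nil _ a _
    · simp only [if_neg hm]
  · simp only [update_feasible_set, update_feasible_set_alt]
    -- both ports share the matching pass verbatim; name its result
    set cur := (PySem.List.pyRange 0 num_players 1).foldl
      (fun cur i =>
        let mi := PySem.List.pyGetD (PySem.List.pyGetD mres (time_slot - 1) []) i 0
        if mi = -1 then cur else PySem.List.pySetD cur mi i)
      (List.replicate num_arms.toNat (-1)) with hcur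
    have harms : ∀ j ∈ PySem.List.pyRange 0 num_arms 1, 0 ≤ j ∧
        (pvPrefixUpto (prefs.getD j.toNat []) (PySem.List.pyGetD cur j 0)).Nodup ∧
        (∀ x ∈ pvPrefixUpto (prefs.getD j.toNat []) (PySem.List.pyGetD cur j 0), 0 ≤ x ∧ x < num_players) := by
      intro j hj
      have hjr := PySem.List.mem_pyRange_one.mp hj
      have hjn : j.toNat < num_arms.toNat := by omega
      obtain ⟨hnd, hrange⟩ := hprefs j.toNat (List.mem_range.mpr hjn)
      have hsub := pvPrefixUpto_sublist (prefs.getD j.toNat []) (PySem.List.pyGetD cur j 0)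
      exact ⟨hjr.1, hnd.sublist hsub, fun x hx => hrange x (hsub.subset hx)⟩
    have houter := pvOuter cur prefs num_players h0p (PySem.List.pyRange 0 num_arms 1)
      (List.replicate num_players.toNat []) (by simp) harms
    apply List.ext_getElem
    · rw [houter.1, List.length_map, PySem.List.length_pyRange_one]
      omega
    · intro k hk1 hk2
      have hkn : k < num_players.toNat := by rw [houter.1] at hk1; exact hk1
      -- left side via the loop invariant
      have hL : (((PySem.List.pyRange 0 num_arms 1).foldl (fun fs j =>
            if PySem.List.pyGetD cur j 0 ≠ -1 then
              pvWalkA (PySem.List.pyGetD prefs j []) (PySem.List.pyGetD cur j 0) j fs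
            else
              (PySem.List.pyRange 0 num_players 1).foldl (fun fs l => pvAppendAt fs l j) fs)
            (List.replicate num_players.toNat []))).getD k [] =
          (PySem.List.pyRange 0 num_arms 1).filter (fun j =>
            if PySem.List.pyGetD cur j 0 = -1 then true
            else (PySem.Set.ofList (pvPrefixUpto (prefs.getD j.toNat []) (PySem.List.pyGetD cur j 0))).contains (k : Int)) := by
        rw [houter.2 k hkn]
        simp
      rw [← List.getD_eq_getElem _ [] hk1, hL]
      -- right side: evaluate the map at index k
      rw [List.getElem_map, PySem.List.getElem_pyRange_one]
      have hzk : (0 : Int) + (k : Int) = (k : Int) := by omega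
      rw [hzk]
      -- the filter predicates agree on every arm of the range
      apply List.filter_congr
      intro j hj
      have hjr := PySem.List.mem_pyRange_one.mp hj
      have hfeas : PySem.List.pyGetD ((PySem.List.pyRange 0 num_arms 1).map
          (fun j => if PySem.List.pyGetD cur j 0 = -1 then (none : Option (PySem.Set Int))
            else some (PySem.Set.ofList (pvPrefixUpto (PySem.List.pyGetD prefs j []) (PySem.List.pyGetD cur j 0))))) j none =
          (if PySem.List.pyGetD cur j 0 = -1 then (none : Option (PySem.Set Int))
            else some (PySem.Set.ofList (pvPrefixUpto (PySem.List.pyGetD prefs j []) (PySem.List.pyGetD cur j 0)))) :=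
        PySem.List.pyGetD_map_pyRange_of_nonneg _ num_arms j none hjr.1 hjr.2
      rw [hfeas]
      have hpg : PySem.List.pyGetD prefs j [] = prefs.getD j.toNat [] :=
        pvPyGetD_nonneg prefs j [] hjr.1
      by_cases hm : PySem.List.pyGetD cur j 0 = -1
      · simp [hm]
      · simp [hm, hpg]
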